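-- pv_equiv track=rewrite | github.com/Aadityasamriya/HFAPI | bot/core/dynamic_fallback_strategy.py | _get_free_tier_models
-- ===== SOURCE A (Python) =====
-- from typing import Dict, List, Optional, Tuple, Any, Set
--
-- def _get_free_tier_models(available_models: List[str]) -> List[str]:
--     """Get models likely to be on free tier"""
--     # Smaller, open-source models are typically free
--     free_indicators = ['mini', 'small', '0.5b', '1.5b', 'phi', 'qwen', 'dialogpt']
--
--     free_models = []
--     for model in available_models:
--         model_lower = model.lower()
--         if any(indicator in model_lower for indicator in free_indicators):
--             free_models.append(model)
--
--     # Add remaining models as backup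
--     for model in available_models:
--         if model not in free_models:
--             free_models.append(model)
--
--     return free_models
-- ===== SOURCE B (Python) =====
-- def _get_free_tier_models(available_models):
--     """Get models likely to be on free tier (single partitioning pass)."""
--     free_indicators = ['mini', 'small', '0.5b', '1.5b', 'phi', 'qwen', 'dialogpt']
--     free = []
--     backup = []
--     seen = set()
--     for model in available_models:
--         model_lower = model.lower()
--         if any(ind in model_lower for ind in free_indicators):
--             free.append(model)
--         elif model not in seen:
--             backup.append(model)
--             seen.add(model)
--     return free + backup
-- ===== Notes on version B (the rewrite author's own statement) =====
-- stated objective: faster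
-- what changed: Replaces A's two scans (the second with an O(n) 'model not in free_models' list-membership test per element, making A quadratic) by one partitioning pass keeping 'free' and 'backup' lists plus an O(1) 'seen' set for backup dedup.
import Mathlib
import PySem

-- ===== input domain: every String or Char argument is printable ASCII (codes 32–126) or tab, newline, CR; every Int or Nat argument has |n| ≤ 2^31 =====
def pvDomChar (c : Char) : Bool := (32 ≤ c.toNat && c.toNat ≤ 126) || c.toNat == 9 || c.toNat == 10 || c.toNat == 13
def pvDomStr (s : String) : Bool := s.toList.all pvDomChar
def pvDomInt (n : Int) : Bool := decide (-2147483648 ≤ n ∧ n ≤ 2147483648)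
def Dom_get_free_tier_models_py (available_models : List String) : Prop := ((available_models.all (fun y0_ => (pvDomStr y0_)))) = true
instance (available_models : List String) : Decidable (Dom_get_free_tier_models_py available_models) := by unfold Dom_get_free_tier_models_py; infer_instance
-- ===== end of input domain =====

-- B replaces A's two scans (the second quadratic via list membership) by one
-- partitioning pass with a 'seen' set; objective: faster (O(n^2) → O(n)).

-- ===== PORT A =====
-- shared by both ports: both Pythons compute literally
-- any(indicator in model.lower() for indicator in free_indicators)
def pvFreeIndicators : List String := ["mini", "small", "0.5b", "1.5b", "phi", "qwen", "dialogpt"]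

def pvMatches (model : String) : Bool :=
  pvFreeIndicators.any (fun indicator => PySem.Str.isIn indicator (PySem.Str.lower model))

-- first loop of A: append matching models
def pvAStep1 (acc : List String) (model : String) : List String :=
  if pvMatches model then acc ++ [model] else acc

-- second loop of A: append model if not already in the list
def pvAStep2 (acc : List String) (model : String) : List String :=
  if model ∈ acc then acc else acc ++ [model]

def get_free_tier_models_py (available_models : List String) : List String :=
  let free_models := available_models.foldl pvAStep1 []
  available_models.foldl pvAStep2 free_models

-- ===== PORT B =====
-- single pass: (free, backup, seen)
def pvBStep (st : List String × List String × PySem.Set String) (model : String) :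
    List String × List String × PySem.Set String :=
  match st with
  | (free, backup, seen) =>
    if pvMatches model then (free ++ [model], backup, seen)
    else if PySem.Set.contains seen model then (free, backup, seen)
    else (free, backup ++ [model], PySem.Set.add seen model)

def get_free_tier_models_py_alt (available_models : List String) : List String :=
  let st := available_models.foldl pvBStep ([], [], PySem.Set.empty)
  st.1 ++ st.2.1

-- ===== PRECONDITION & SPEC =====
def Spec_get_free_tier_models_py (available_models : List String) (out : List String) : Prop := out = get_free_tier_models_py_alt available_models
instance (available_models : List String) (out : List String) : Decidable (Spec_get_free_tier_models_py available_models out) := by unfold Spec_get_free_tier_models_py; infer_instance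

-- ===== CLAIM (what is proved, stated in full; the proofs are below) =====
def Claim_equal_get_free_tier_models_py : Prop := ∀ (available_models : List String), Dom_get_free_tier_models_py available_models → Spec_get_free_tier_models_py available_models (get_free_tier_models_py available_models)

-- ===== LEMMAS AND PROOFS =====

-- reference inner loop: dedup-append of non-matching models only
def pvNMStep (acc : List String) (model : String) : List String :=
  if pvMatches model then acc
  else if model ∈ acc then acc else acc ++ [model]

theorem pvA_loop1 (xs : List String) (acc : List String) :
    xs.foldl pvAStep1 acc = acc ++ xs.filter pvMatches := by
  induction xs generalizing acc with
  | nil => simp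
  | cons x xs ih =>
    simp only [List.foldl_cons, List.filter_cons, pvAStep1]
    by_cases h : pvMatches x = true
    · simp [h, ih]
    · simp [h, ih]

theorem pvA_loop2 (xs F B : List String)
    (hF : ∀ y ∈ F, pvMatches y = true)
    (hB : ∀ y ∈ B, pvMatches y = false)
    (hxs : ∀ x ∈ xs, pvMatches x = true → x ∈ F) :
    xs.foldl pvAStep2 (F ++ B) = F ++ xs.foldl pvNMStep B := by
  induction xs generalizing B with
  | nil => simp
  | cons x xs ih =>
    simp only [List.foldl_cons, pvAStep2, pvNMStep]
    by_cases hm : pvMatches x = true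
    · have hxF : x ∈ F := hxs x (by simp) hm
      simp only [hm, if_true]
      rw [if_pos (by simp [hxF])]
      exact ih B hB (fun y hy => hxs y (by simp [hy]))
    · have hxF : x ∉ F := fun h => hm (hF x h)
      have hmem : x ∈ F ++ B ↔ x ∈ B := by simp [hxF]
      simp only [Bool.not_eq_true] at hm
      simp only [hm, Bool.false_eq_true, if_false]
      by_cases hb : x ∈ B
      · rw [if_pos (hmem.mpr hb), if_pos hb]
        exact ih B hB (fun y hy => hxs y (by simp [hy]))
      · rw [if_neg (fun h => hb (hmem.mp h)), if_neg hb, List.append_assoc]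
        exact ih (B ++ [x])
          (by intro y hy; rcases List.mem_append.mp hy with h | h
              · exact hB y h
              · simp at h; subst h; exact hm)
          (fun y hy => hxs y (by simp [hy]))

theorem pvB_loop (xs : List String) (f b : List String) (s : PySem.Set String)
    (hs : ∀ x, x ∈ s ↔ x ∈ b) :
    (xs.foldl pvBStep (f, b, s)).1 = f ++ xs.filter pvMatches ∧
    (xs.foldl pvBStep (f, b, s)).2.1 = xs.foldl pvNMStep b := by
  induction xs generalizing f b s with
  | nil => simp
  | cons x xs ih =>
    simp only [List.foldl_cons, pvBStep, pvNMStep, List.filter_cons]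
    by_cases hm : pvMatches x = true
    · simp only [hm, if_true]
      have := ih (f ++ [x]) b s hs
      simpa [List.append_assoc] using this
    · simp only [Bool.not_eq_true] at hm
      simp only [hm, Bool.false_eq_true, if_false]
      by_cases hb : x ∈ b
      · rw [if_pos ((PySem.Set.contains_iff _ _).mpr ((hs x).mpr hb)), if_pos hb]
        exact ih f b s hs
      · have hcs : PySem.Set.contains s x = false := by
          rw [Bool.eq_false_iff]
          intro h; exact hb ((hs x).mp ((PySem.Set.contains_iff _ _).mp h))
        rw [hcs, if_neg (by simp), if_neg hb]
        refine ih f (b ++ [x]) (PySem.Set.add s x) ?_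
        intro y
        simp [PySem.Set.mem_add, hs y, or_comm]

-- ===== VERDICT (by name: the statement is the Claim_ definition above) =====
theorem get_free_tier_models_py_spec : Claim_equal_get_free_tier_models_py := by
  intro xs _
  unfold Spec_get_free_tier_models_py get_free_tier_models_py get_free_tier_models_py_alt
  have h1 : xs.foldl pvAStep1 [] = xs.filter pvMatches := by simpa using pvA_loop1 xs []
  have h2 := pvA_loop2 xs (xs.filter pvMatches) []
    (fun y hy => (List.mem_filter.mp hy).2)
    (by simp)
    (fun x hx hm => List.mem_filter.mpr ⟨hx, hm⟩)
  have h3 := pvB_loop xs [] [] PySem.Set.empty (by simp [PySem.Set.empty])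
  simp only [h1]
  simp only [List.append_nil] at h2
  rw [h2, h3.1, h3.2]
  simp
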